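-- pv_equiv track=rewrite | github.com/MordenLee/fue | backend/chat/tools.py | _keyword_match_stats
-- ===== SOURCE A (Python) =====
-- def _keyword_match_stats(text: str, terms: list[str]) -> tuple[int, int, int]:
--     """Return (distinct_terms_matched, total_occurrences, first_match_pos)."""
--     lowered_text = text.lower()
--     distinct_hits = 0
--     total_hits = 0
--     first_pos = len(lowered_text)
--
--     for term in terms:
--         lowered_term = term.lower()
--         hits = lowered_text.count(lowered_term)
--         if hits <= 0:
--             continue
--         distinct_hits += 1
--         total_hits += hits
--         pos = lowered_text.find(lowered_term)
--         if pos >= 0: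
--             first_pos = min(first_pos, pos)
--
--     return distinct_hits, total_hits, first_pos
-- ===== SOURCE B (Python) =====
-- def _keyword_match_stats(text: str, terms: list[str]) -> tuple[int, int, int]:
--     """Position-major scan: walk the text once; at each start position test every
--     pattern (skipping positions inside a previous match of that pattern, which
--     replicates str.count's non-overlapping counting)."""
--     s = text.lower()
--     n = len(s)
--     pats = [t.lower() for t in terms]
--     k = len(pats)
--     cnts = [0] * k
--     firsts = [-1] * k
--     nxt = [0] * k
--     for i in range(n + 1):
--         for j in range(k):
--             if nxt[j] <= i and s.startswith(pats[j], i):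
--                 cnts[j] += 1
--                 nxt[j] = i + len(pats[j])
--                 if firsts[j] < 0:
--                     firsts[j] = i
--     matched = [c for c in cnts if c > 0]
--     distinct = len(matched)
--     total = sum(matched)
--     first_pos = min((f for f in firsts if f >= 0), default=n)
--     return distinct, total, first_pos
-- ===== Notes on version B (the rewrite author's own statement) =====
-- stated objective: alternative
-- what changed: B inverts the traversal: instead of A's term-major loop that runs two full library scans (str.count, str.find) over the text per term, B walks the text positions once (position-major multi-pattern scan) and at each start position tests every pattern with startswith, keeping per-pattern (count, first, next-allowed-position) state so non-overlapping counting is replicated; aggregates are then read off the state table.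
import Mathlib
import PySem

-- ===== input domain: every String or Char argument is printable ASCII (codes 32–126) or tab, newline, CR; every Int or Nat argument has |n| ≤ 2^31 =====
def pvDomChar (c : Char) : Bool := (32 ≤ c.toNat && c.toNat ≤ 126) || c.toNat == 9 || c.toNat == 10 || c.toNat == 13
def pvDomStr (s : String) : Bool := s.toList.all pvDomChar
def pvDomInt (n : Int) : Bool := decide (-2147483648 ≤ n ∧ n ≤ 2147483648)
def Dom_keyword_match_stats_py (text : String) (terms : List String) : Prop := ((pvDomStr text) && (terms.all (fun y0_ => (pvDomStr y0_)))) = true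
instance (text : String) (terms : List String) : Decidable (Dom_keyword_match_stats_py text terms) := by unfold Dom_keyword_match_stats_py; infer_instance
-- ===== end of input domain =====

-- B inverts A's traversal: instead of a term-major loop with two library scans per term,
-- B walks the text positions once and tests every pattern at each position, keeping
-- per-pattern (count, first, next-allowed) state; objective: alternative (same cost class).

-- ===== PORT A =====
def keyword_match_stats_py (text : String) (terms : List String) : Int × Int × Int :=
  let lowered := PySem.Str.lower text
  terms.foldl
    (fun acc term =>
      let lterm := PySem.Str.lower term
      let hits : Int := (PySem.Str.count lowered lterm : Int)
      if hits ≤ 0 then acc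
      else
        let pos := PySem.Str.find lowered lterm
        (acc.1 + 1, acc.2.1 + hits, if 0 ≤ pos then min acc.2.2 pos else acc.2.2))
    (0, 0, (PySem.Str.len lowered : Int))

-- ===== PORT B =====
-- per-pattern state (pattern, count, first-match index or -1, next allowed position);
-- Python's 's.startswith(p, i)' for 0 ≤ i ≤ len(s) is exactly 'startswith (s.drop i) p'
def pvStep (s : List Char) (i : Nat) (st : List Char × Nat × Int × Nat) :
    List Char × Nat × Int × Nat :=
  if st.2.2.2 ≤ i ∧ PySem.Chars.startswith (s.drop i) st.1 = true then
    (st.1, st.2.1 + 1, if st.2.2.1 < 0 then (i : Int) else st.2.2.1, i + st.1.length)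
  else st

def keyword_match_stats_py_alt (text : String) (terms : List String) : Int × Int × Int :=
  let s := (PySem.Str.lower text).toList
  let n := s.length
  let pats := terms.map (fun t => (PySem.Str.lower t).toList)
  let final := (List.range (n + 1)).foldl (fun sts i => sts.map (pvStep s i))
      (pats.map (fun p => (p, 0, -1, 0)))
  let matched := (final.map (fun st => st.2.1)).filter (fun c => 0 < c)
  let firstPos : Int :=
    match PySem.List.min? ((final.map (fun st => st.2.2.1)).filter (fun f => 0 ≤ f)) (fun x => x) with
    | some m => m
    | none => (n : Int)
  ((matched.length : Int), ((matched.sum : Nat) : Int), firstPos)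

-- ===== PRECONDITION & SPEC =====
def Spec_keyword_match_stats_py (text : String) (terms : List String) (out : Int × Int × Int) : Prop := out = keyword_match_stats_py_alt text terms
instance (text : String) (terms : List String) (out : Int × Int × Int) : Decidable (Spec_keyword_match_stats_py text terms out) := by unfold Spec_keyword_match_stats_py; infer_instance

-- ===== CLAIM (what is proved, stated in full; the proofs are below) =====
def Claim_equal_keyword_match_stats_py : Prop := ∀ (text : String) (terms : List String), Dom_keyword_match_stats_py text terms → Spec_keyword_match_stats_py text terms (keyword_match_stats_py text terms)

-- ===== LEMMAS AND PROOFS =====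

theorem pvPrefix_length_le {t u : List Char} (h : t.isPrefixOf u = true) : t.length ≤ u.length :=
  (List.isPrefixOf_iff_prefix.mp h).length_le

theorem pvStartswith_eq (u p : List Char) : PySem.Chars.startswith u p = p.isPrefixOf u := by
  rw [Bool.eq_iff_iff, PySem.Chars.startswith_iff, List.isPrefixOf_iff_prefix]

theorem pvCountGo_short (t : List Char) :
    ∀ fuel (u : List Char) (acc : Nat), u.length < t.length →
      PySem.Chars.count.go t fuel u acc = acc := by
  intro fuel
  induction fuel with
  | zero => intro u acc h; rw [PySem.Chars.count.go]
  | succ n ih =>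
      intro u acc h
      cases u with
      | nil => rw [PySem.Chars.count.go]; omega
      | cons c u' =>
          rw [PySem.Chars.count.go]
          rw [if_neg (fun hp => absurd (pvPrefix_length_le hp) (by omega))]
          exact ih u' acc (by simp at h ⊢; omega)

theorem pvFindGo_short (t : List Char) (ht : t ≠ []) :
    ∀ (u : List Char) (k : Nat), u.length < t.length →
      PySem.Chars.find.go t u k = -1 := by
  intro u
  induction u with
  | nil => intro k h; rw [PySem.Chars.find.go]; simp [List.isEmpty_iff, ht]
  | cons c u' ih =>
      intro k h
      rw [PySem.Chars.find.go]
      rw [if_neg (fun hp => absurd (pvPrefix_length_le hp) (by omega))]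
      exact ih (k+1) (by simp at h ⊢; omega)

-- positions strictly below the pattern's next-allowed position leave the state unchanged
theorem pvSkip (s : List Char) :
    ∀ (l : List Nat) (st : List Char × Nat × Int × Nat),
      (∀ j ∈ l, j < st.2.2.2) →
      l.foldl (fun st j => pvStep s j st) st = st := by
  intro l
  induction l with
  | nil => intro st _; rfl
  | cons j l' ih =>
      intro st h
      have hj : pvStep s j st = st := by
        unfold pvStep
        rw [if_neg]
        rintro ⟨h1, -⟩
        exact absurd h1 (by have := h j (by simp); omega)
      simp only [List.foldl_cons, hj]
      exact ih st (fun x hx => h x (by simp [hx]))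

-- the position-major scan of one NONEMPTY pattern computes count.go / find.go
theorem pvScanAux (s : List Char) (c0 : Char) (pr : List Char) :
    ∀ (fuelI i cnt nxt : Nat) (first : Int) (fuelC : Nat),
      nxt ≤ i → i ≤ s.length → s.length - i ≤ fuelI → s.length - i ≤ fuelC →
      (first < 0 → first = -1) →
      ∃ nx, (List.range' i (s.length + 1 - i)).foldl (fun st j => pvStep s j st)
          ((c0 :: pr), cnt, first, nxt)
        = ((c0 :: pr), PySem.Chars.count.go (c0 :: pr) fuelC (s.drop i) cnt,
           (if first < 0 then PySem.Chars.find.go (c0 :: pr) (s.drop i) i else first), nx) := by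
  intro fuelI
  induction fuelI with
  | zero =>
      intro i cnt nxt first fuelC h1 h2 h3 h4 h5
      have hi : i = s.length := by omega
      subst hi
      rw [show s.length + 1 - s.length = 1 by omega, List.range'_succ, List.drop_length]
      refine ⟨nxt, ?_⟩
      simp only [List.range'_zero, List.foldl_cons, List.foldl_nil]
      have hstep : pvStep s s.length ((c0 :: pr), cnt, first, nxt) = ((c0 :: pr), cnt, first, nxt) := by
        unfold pvStep
        rw [if_neg]
        rintro ⟨-, h⟩
        rw [List.drop_length, pvStartswith_eq] at h
        exact absurd (pvPrefix_length_le h) (by simp)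
      rw [hstep, pvCountGo_short _ _ _ _ (by simp),
          pvFindGo_short _ (by simp) _ _ (by simp)]
      have hX : first = (if first < 0 then (-1 : Int) else first) := by
        by_cases hf : first < 0
        · rw [if_pos hf, h5 hf]
        · rw [if_neg hf]
      rw [← hX]
  | succ n ihI =>
      intro i cnt nxt first fuelC h1 h2 h3 h4 h5
      by_cases hi : i = s.length
      · subst hi
        rw [show s.length + 1 - s.length = 1 by omega, List.range'_succ, List.drop_length]
        refine ⟨nxt, ?_⟩
        simp only [List.range'_zero, List.foldl_cons, List.foldl_nil]
        have hstep : pvStep s s.length ((c0 :: pr), cnt, first, nxt) = ((c0 :: pr), cnt, first, nxt) := by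
          unfold pvStep
          rw [if_neg]
          rintro ⟨-, h⟩
          rw [List.drop_length, pvStartswith_eq] at h
          exact absurd (pvPrefix_length_le h) (by simp)
        rw [hstep, pvCountGo_short _ _ _ _ (by simp),
            pvFindGo_short _ (by simp) _ _ (by simp)]
        have hX : first = (if first < 0 then (-1 : Int) else first) := by
          by_cases hf : first < 0
          · rw [if_pos hf, h5 hf]
          · rw [if_neg hf]
        rw [← hX]
      · have hilt : i < s.length := by omega
        obtain ⟨c, u', hcu⟩ := List.exists_cons_of_ne_nil
          (show s.drop i ≠ [] by
            intro h
            have := congrArg List.length h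
            simp at this
            omega)
        have hulen : u'.length = s.length - (i + 1) := by
          have := congrArg List.length hcu
          simp at this
          omega
        have hu' : u' = s.drop (i + 1) := by
          have h := congrArg List.tail hcu
          simp only [List.tail_drop, List.tail_cons] at h
          exact h.symm
        rw [show s.length + 1 - i = (s.length - i) + 1 by omega, List.range'_succ]
        simp only [List.foldl_cons]
        cases fuelC with
        | zero => omega
        | succ fc =>
        by_cases hp : (c0 :: pr).isPrefixOf (s.drop i) = true
        · -- a match at position i: count it, jump to i + |p|
          have hm1 : (c0 :: pr).length ≤ s.length - i := by
            have := pvPrefix_length_le hp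
            have hd : (s.drop i).length = s.length - i := by simp
            omega
          have hstep : pvStep s i ((c0 :: pr), cnt, first, nxt)
              = ((c0 :: pr), cnt + 1, (if first < 0 then (i : Int) else first),
                 i + (c0 :: pr).length) := by
            unfold pvStep
            rw [if_pos ⟨h1, by rw [pvStartswith_eq]; exact hp⟩]
          rw [hstep]
          have hsplit : List.range' (i + 1) (s.length - i)
              = List.range' (i + 1) ((c0 :: pr).length - 1)
                ++ List.range' (i + (c0 :: pr).length)
                    (s.length + 1 - (i + (c0 :: pr).length)) := by
            rw [show s.length - i
                  = ((c0 :: pr).length - 1) + (s.length + 1 - (i + (c0 :: pr).length)) by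
                simp only [List.length_cons] at hm1 ⊢; omega]
            have := List.range'_append (s := i + 1) (m := (c0 :: pr).length - 1)
              (n := s.length + 1 - (i + (c0 :: pr).length)) (step := 1)
            rw [show i + 1 + 1 * ((c0 :: pr).length - 1) = i + (c0 :: pr).length by
                  simp only [List.length_cons]; omega] at this
            exact this.symm
          rw [hsplit, List.foldl_append]
          have hskip := pvSkip s (List.range' (i + 1) ((c0 :: pr).length - 1))
            ((c0 :: pr), cnt + 1, (if first < 0 then (i : Int) else first),
             i + (c0 :: pr).length)
            (by
              intro j hj
              simp only [List.mem_range'] at hj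
              obtain ⟨k, hk, rfl⟩ := hj
              simp only [List.length_cons] at hk ⊢
              omega)
          rw [hskip]
          have hnn : ¬ (if first < 0 then (i : Int) else first) < 0 := by
            split <;> omega
          obtain ⟨nx, hnx⟩ := ihI (i + (c0 :: pr).length) (cnt + 1) (i + (c0 :: pr).length)
            (if first < 0 then (i : Int) else first) fc (le_refl _) (by omega)
            (by simp only [List.length_cons] at hm1 ⊢; omega)
            (by simp only [List.length_cons] at hm1 ⊢; omega)
            (fun h => absurd h hnn)
          refine ⟨nx, ?_⟩
          rw [hnx]
          have hcnt : PySem.Chars.count.go (c0 :: pr) (fc + 1) (s.drop i) cnt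
              = PySem.Chars.count.go (c0 :: pr) fc (s.drop (i + (c0 :: pr).length)) (cnt + 1) := by
            rw [hcu, PySem.Chars.count.go, if_pos (hcu ▸ hp)]
            congr 1
            rw [← hcu, List.drop_drop]
          have hfind : PySem.Chars.find.go (c0 :: pr) (s.drop i) i = (i : Int) := by
            rw [hcu, PySem.Chars.find.go, if_pos (hcu ▸ hp)]
          rw [hcnt, hfind, if_neg hnn]
        · -- no match at position i: the state is unchanged, advance one position
          have hstep : pvStep s i ((c0 :: pr), cnt, first, nxt) = ((c0 :: pr), cnt, first, nxt) := by
            unfold pvStep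
            rw [if_neg]
            rintro ⟨-, h⟩
            rw [pvStartswith_eq] at h
            exact hp h
          rw [hstep, show s.length - i = s.length + 1 - (i + 1) by omega]
          obtain ⟨nx, hnx⟩ := ihI (i + 1) cnt nxt first fc (by omega) (by omega)
            (by omega) (by omega) h5
          refine ⟨nx, ?_⟩
          rw [hnx]
          have hcnt : PySem.Chars.count.go (c0 :: pr) (fc + 1) (s.drop i) cnt
              = PySem.Chars.count.go (c0 :: pr) fc (s.drop (i + 1)) cnt := by
            rw [hcu, PySem.Chars.count.go, if_neg (hcu ▸ hp), hu']
          have hfind : PySem.Chars.find.go (c0 :: pr) (s.drop i) i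
              = PySem.Chars.find.go (c0 :: pr) (s.drop (i + 1)) (i + 1) := by
            rw [hcu, PySem.Chars.find.go, if_neg (hcu ▸ hp), hu']
          rw [hcnt, hfind]

-- the position-major scan of the EMPTY pattern matches at every position
theorem pvScanNil (s : List Char) :
    ∀ (k i cnt nxt : Nat) (first : Int),
      nxt ≤ i → (first < 0 → first = -1) →
      ∃ nx, (List.range' i k).foldl (fun st j => pvStep s j st) (([] : List Char), cnt, first, nxt)
        = ([], cnt + k, (if k = 0 then first else if first < 0 then (i : Int) else first), nx) := by
  intro k
  induction k with
  | zero =>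
      intro i cnt nxt first h1 h2
      exact ⟨nxt, by simp⟩
  | succ k ih =>
      intro i cnt nxt first h1 h2
      rw [List.range'_succ]
      simp only [List.foldl_cons]
      have hstep : pvStep s i (([] : List Char), cnt, first, nxt)
          = ([], cnt + 1, (if first < 0 then (i : Int) else first), i) := by
        unfold pvStep
        rw [if_pos ⟨h1, by rw [pvStartswith_eq]; rfl⟩]
        simp
      rw [hstep]
      have hnn : ¬ (if first < 0 then (i : Int) else first) < 0 := by
        split <;> omega
      obtain ⟨nx, hnx⟩ := ih (i + 1) (cnt + 1) i (if first < 0 then (i : Int) else first)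
        (by omega) (fun h => absurd h hnn)
      refine ⟨nx, ?_⟩
      rw [hnx, if_neg (by omega : ¬ k + 1 = 0),
          show cnt + 1 + k = cnt + (k + 1) by omega]
      by_cases hk : k = 0
      · rw [if_pos hk]
      · rw [if_neg hk, if_neg hnn]

theorem pvScanTerm (s p : List Char) :
    ∃ nx, (List.range (s.length + 1)).foldl (fun st j => pvStep s j st) (p, 0, -1, 0)
      = (p, PySem.Chars.count s p, PySem.Chars.find s p, nx) := by
  cases p with
  | nil =>
      obtain ⟨nx, hnx⟩ := pvScanNil s (s.length + 1) 0 0 0 (-1) (le_refl 0) (fun _ => rfl)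
      refine ⟨nx, ?_⟩
      rw [List.range_eq_range', hnx]
      rw [if_neg (by omega : ¬ s.length + 1 = 0), if_pos (by omega : (-1 : Int) < 0)]
      have h1 : PySem.Chars.count s ([] : List Char) = s.length + 1 := by
        rw [PySem.Chars.count, if_pos (by simp)]
      have h2 : PySem.Chars.find s ([] : List Char) = 0 := PySem.Chars.find_nil s
      rw [h1, h2]
      norm_num
  | cons c0 pr =>
      obtain ⟨nx, hnx⟩ := pvScanAux s c0 pr s.length 0 0 0 (-1) s.length (le_refl 0)
        (Nat.zero_le _) (by omega) (by omega) (fun _ => rfl)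
      refine ⟨nx, ?_⟩
      rw [List.range_eq_range']
      simp only [Nat.sub_zero, List.drop_zero] at hnx
      rw [hnx, if_pos (by omega : (-1 : Int) < 0)]
      rw [PySem.Chars.count, if_neg (by simp), PySem.Chars.find]

theorem pvScan_cnt (s p : List Char) :
    ((List.range (s.length + 1)).foldl (fun st j => pvStep s j st) (p, 0, -1, 0)).2.1
      = PySem.Chars.count s p := by
  obtain ⟨nx, h⟩ := pvScanTerm s p; rw [h]

theorem pvScan_first (s p : List Char) :
    ((List.range (s.length + 1)).foldl (fun st j => pvStep s j st) (p, 0, -1, 0)).2.2.1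
      = PySem.Chars.find s p := by
  obtain ⟨nx, h⟩ := pvScanTerm s p; rw [h]

theorem pvCountPos (s p : List Char) :
    (0 < PySem.Chars.count s p) ↔ (0 ≤ PySem.Chars.find s p) := by
  have inv : ∀ (l : List Nat) (st : List Char × Nat × Int × Nat),
      (0 < st.2.1 ↔ 0 ≤ st.2.2.1) →
      (0 < (l.foldl (fun st j => pvStep s j st) st).2.1
        ↔ 0 ≤ (l.foldl (fun st j => pvStep s j st) st).2.2.1) := by
    intro l
    induction l with
    | nil => intro st h; exact h
    | cons j l' ih =>
        intro st h
        simp only [List.foldl_cons]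
        apply ih
        unfold pvStep
        split
        · dsimp only
          constructor
          · intro _
            split <;> omega
          · intro _
            omega
        · exact h
  have h := inv (List.range (s.length + 1)) (p, 0, -1, 0) (by dsimp only; constructor <;> omega)
  rwa [pvScan_cnt, pvScan_first] at h

-- a fold of per-element maps is the map of per-element folds
theorem pvMapFold {S : Type} (step : Nat → S → S) :
    ∀ (l : List Nat) (sts : List S),
      l.foldl (fun sts i => sts.map (step i)) sts
        = sts.map (fun st => l.foldl (fun st i => step i st) st) := by
  intro l
  induction l with
  | nil => intro sts; simp
  | cons i l' ih =>
      intro sts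
      simp only [List.foldl_cons]
      rw [ih, List.map_map]
      rfl

def pvMinStep (acc : Option Int) (x : Int) : Option Int :=
  match acc with
  | none => some x
  | some m => if x < m then some x else some m

theorem pvMin?_eq_foldl (l : List Int) :
    PySem.List.min? l (fun x => x) = l.foldl pvMinStep none := by
  rw [PySem.List.min?]
  congr 1
  funext acc x
  cases acc <;> rfl

theorem pvMinSome (l : List Int) :
    ∀ (m : Int), l.foldl pvMinStep (some m) = some (l.foldl min m) := by
  induction l with
  | nil => intro m; rfl
  | cons x xs ih =>
      intro m
      simp only [List.foldl_cons]
      have hm : pvMinStep (some m) x = some (min m x) := by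
        simp only [pvMinStep]; split <;> simp <;> omega
      rw [hm, ih]

theorem pvMinFold (l : List Int) (a : Int) (ha : ∀ x ∈ l, x ≤ a) :
    l.foldl min a =
      (match PySem.List.min? l (fun x => x) with
       | some m => m
       | none => a) := by
  rw [pvMin?_eq_foldl]
  cases l with
  | nil => rfl
  | cons x xs =>
      simp only [List.foldl_cons]
      rw [show pvMinStep none x = some x from rfl]
      rw [pvMinSome]
      have hx : min a x = x := by
        have := ha x (by simp)
        omega
      rw [hx]

-- A's accumulator fold, characterised term-by-term via Chars.count / Chars.find
theorem pvAFold (lowered : String) (terms : List String) :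
    ∀ (d tot f : Int),
      terms.foldl
        (fun acc term =>
          let lterm := PySem.Str.lower term
          let hits : Int := (PySem.Str.count lowered lterm : Int)
          if hits ≤ 0 then acc
          else
            let pos := PySem.Str.find lowered lterm
            (acc.1 + 1, acc.2.1 + hits, if 0 ≤ pos then min acc.2.2 pos else acc.2.2))
        (d, tot, f)
      =
      (let M := terms.filter
          (fun term => 0 < PySem.Chars.count lowered.toList (PySem.Str.lower term).toList)
       (d + (M.length : Int),
        tot + (M.map (fun term => (PySem.Chars.count lowered.toList (PySem.Str.lower term).toList : Int))).sum,
        (M.map (fun term => PySem.Chars.find lowered.toList (PySem.Str.lower term).toList)).foldl min f)) := by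
  induction terms with
  | nil => intro d tot f; simp
  | cons term rest ih =>
      intro d tot f
      simp only [List.foldl_cons, List.filter_cons]
      have hc : (PySem.Str.count lowered (PySem.Str.lower term) : Int)
          = (PySem.Chars.count lowered.toList (PySem.Str.lower term).toList : Int) := by
        rw [PySem.Str.count_eq]
      have hfd : PySem.Str.find lowered (PySem.Str.lower term)
          = PySem.Chars.find lowered.toList (PySem.Str.lower term).toList := by
        rw [PySem.Str.find_eq]
      by_cases hpos : 0 < PySem.Chars.count lowered.toList (PySem.Str.lower term).toList
      · rw [if_neg (by rw [hc]; exact_mod_cast Nat.not_le.mpr hpos), hc, hfd,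
            if_pos ((pvCountPos _ _).mp hpos), if_pos (by simpa using hpos), ih]
        simp only [List.map_cons, List.length_cons, List.foldl_cons, List.sum_cons]
        refine Prod.ext ?_ (Prod.ext ?_ ?_)
        · push_cast; ring
        · push_cast; ring
        · rfl
      · rw [if_pos (by rw [hc]; exact_mod_cast Nat.le_of_not_lt hpos),
            if_neg (by simpa using hpos)]
        exact ih d tot f

-- ===== VERDICT (by name: the statement is the Claim_ definition above) =====
theorem keyword_match_stats_py_spec : Claim_equal_keyword_match_stats_py := by
  intro text terms _
  unfold Spec_keyword_match_stats_py
  simp only [keyword_match_stats_py, keyword_match_stats_py_alt]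
  rw [pvAFold, pvMapFold]
  simp only [List.map_map, Function.comp_def, pvScan_cnt, pvScan_first]
  rw [List.filter_map, List.filter_map]
  simp only [Function.comp_def]
  have hPred : (fun t : String =>
        decide (0 ≤ PySem.Chars.find (PySem.Str.lower text).toList (PySem.Str.lower t).toList))
      = (fun t : String =>
        decide (0 < PySem.Chars.count (PySem.Str.lower text).toList (PySem.Str.lower t).toList)) := by
    funext t
    exact decide_eq_decide.mpr (pvCountPos _ _).symm
  rw [hPred]
  have hlen : PySem.Str.len (PySem.Str.lower text)
      = (((PySem.Str.lower text).toList.length : Nat) : Int) := by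
    simp
  rw [hlen]
  refine Prod.ext ?_ (Prod.ext ?_ ?_)
  · dsimp only
    rw [List.length_map, zero_add]
  · dsimp only
    rw [Nat.cast_list_sum, List.map_map, zero_add]
    simp only [Function.comp_def]
  · dsimp only
    rw [pvMinFold _ _ (by
      intro x hx
      simp only [List.mem_map] at hx
      obtain ⟨t, -, rfl⟩ := hx
      exact PySem.Chars.find_le_length _ _)]
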